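-- pv_equiv track=rewrite | github.com/DeanHe/Practice | LeetCodePython/SplitAndMergeArrayTransformation.py | minSplitMerge
-- ===== SOURCE A (Python) =====
-- from collections import deque
-- from typing import List
--
-- def minSplitMerge(nums1: List[int], nums2: List[int]) -> int:
--     sz = len(nums1)
--
--     def getNeighbors(arr):
--         arr = list(arr)
--         res = []
--         for l in range(sz):
--             for r in range(l + 1, sz):
--                 subarray = arr[l:r]
--                 remain = arr[:l] + arr[r:]
--                 for i in range(len(remain) + 1):
--                     cand = remain[:i] + subarray + remain[i:]
--                     res.append(tuple(cand))
--         return res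
--
--     visited = set()
--     visited.add(tuple(nums1))
--     step = 0
--     q = deque([tuple(nums1)])
--     target = tuple(nums2)
--     while q:
--         q_len = len(q)
--         for _ in range(q_len):
--             cur = q.popleft()
--             if cur == target:
--                 return step
--             for nb in getNeighbors(cur):
--                 if nb not in visited:
--                     visited.add(nb)
--                     q.append(nb)
--         step += 1
--     return -1
-- ===== SOURCE B (Python) =====
-- from typing import List
--
--
-- def minSplitMerge(nums1: List[int], nums2: List[int]) -> int:
--     # Bidirectional BFS: grow a ball of states around nums1 and one around nums2
--     # (the split-merge move relation is symmetric), expanding the smaller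
--     # frontier first, and return the sum of the two depths at the first meet.
--     if nums1 == nums2:
--         return 0
--     if sorted(nums1) != sorted(nums2):
--         return -1
--     sz = len(nums1)
--
--     def getNeighbors(arr):
--         res = []
--         for l in range(sz):
--             for r in range(l + 1, sz):
--                 subarray = arr[l:r]
--                 remain = arr[:l] + arr[r:]
--                 for i in range(len(remain) + 1):
--                     res.append(remain[:i] + subarray + remain[i:])
--         return res
--
--     src, dst = tuple(nums1), tuple(nums2)
--     seen1, seen2 = {src}, {dst}
--     front1, front2 = [src], [dst]
--     d1 = d2 = 0
--     while front1 and front2: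
--         if len(front1) <= len(front2):
--             d1 += 1
--             nxt = []
--             for cur in front1:
--                 for nb in getNeighbors(cur):
--                     if nb in seen1:
--                         continue
--                     if nb in seen2:
--                         return d1 + d2
--                     seen1.add(nb)
--                     nxt.append(nb)
--             front1 = nxt
--         else:
--             d2 += 1
--             nxt = []
--             for cur in front2:
--                 for nb in getNeighbors(cur):
--                     if nb in seen2:
--                         continue
--                     if nb in seen1:
--                         return d1 + d2
--                     seen2.add(nb)
--                     nxt.append(nb)
--             front2 = nxt
--     return -1
-- ===== Notes on version B (the rewrite author's own statement) =====
-- stated objective: faster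
-- what changed: B replaces A's single-source deque BFS by a bidirectional BFS: it grows one visited ball around nums1 and one around nums2 (the split-merge move relation is symmetric), always expands the smaller frontier by one level, and returns the sum of the two depths at the first meeting; a sorted-permutation pre-check returns -1 immediately when nums2 is not a rearrangement of nums1, where A exhausts the whole reachable state space.
import Mathlib
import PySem

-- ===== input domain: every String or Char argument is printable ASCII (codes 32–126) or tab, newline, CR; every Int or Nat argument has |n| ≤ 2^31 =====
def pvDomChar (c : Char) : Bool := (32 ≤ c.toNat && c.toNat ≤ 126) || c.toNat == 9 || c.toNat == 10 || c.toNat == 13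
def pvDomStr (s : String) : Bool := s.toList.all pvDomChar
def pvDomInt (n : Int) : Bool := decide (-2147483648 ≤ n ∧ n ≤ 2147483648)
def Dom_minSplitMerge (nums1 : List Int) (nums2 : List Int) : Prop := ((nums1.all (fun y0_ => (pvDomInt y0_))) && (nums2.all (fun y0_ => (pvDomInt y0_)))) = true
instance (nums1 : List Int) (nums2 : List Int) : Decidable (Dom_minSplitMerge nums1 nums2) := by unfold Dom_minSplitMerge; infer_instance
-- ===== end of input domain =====

-- B replaces A's single-source BFS by a bidirectional BFS: it grows one ball of states around
-- nums1 and one around nums2 (the split-merge move relation is symmetric), always expanding the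
-- smaller frontier, and returns the sum of the two depths at the first meeting; a sorted-permutation
-- pre-check returns -1 directly when nums2 is no rearrangement of nums1.

-- ===== PORT A =====
-- getNeighbors of A: list of candidate states in generation order
def pvGetNeighborsA (sz : Int) (arr : List Int) : List (List Int) :=
  (PySem.List.pyRange 0 sz 1).foldl (fun res l =>
    (PySem.List.pyRange (l + 1) sz 1).foldl (fun res r =>
      let subarray := PySem.List.slice arr (some l) (some r)
      let remain := PySem.List.slice arr none (some l) ++ PySem.List.slice arr (some r) none
      (PySem.List.pyRange 0 ((remain.length : Int) + 1) 1).foldl (fun res i =>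
        res ++ [PySem.List.slice remain none (some i) ++ subarray ++ PySem.List.slice remain (some i) none]) res) res) []

-- inner 'for nb in getNeighbors(cur)': add unseen neighbours to visited and append them to the queue
def pvExpandA (visited : PySem.Set (List Int)) (acc : List (List Int)) (nbs : List (List Int)) :
    PySem.Set (List Int) × List (List Int) :=
  nbs.foldl (fun p nb => if p.1.contains nb then p else (PySem.Set.add p.1 nb, p.2 ++ [nb])) (visited, acc)

-- one level of the while loop: pop q_len elements; none = 'return step' (target popped)
def pvLevelA (target : List Int) (sz : Int) :
    List (List Int) → PySem.Set (List Int) → List (List Int) →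
    Option (PySem.Set (List Int) × List (List Int))
  | [], visited, acc => some (visited, acc)
  | cur :: rest, visited, acc =>
    if cur = target then none
    else
      let p := pvExpandA visited acc (pvGetNeighborsA sz cur)
      pvLevelA target sz rest p.1 p.2

-- the while loop; fuel only makes the loop total (one unit per iteration; it is ample:
-- the loop runs at most once per distinct reachable state, and states are lists drawn from nums1)
def pvBfsA (target : List Int) (sz : Int) :
    Nat → List (List Int) → PySem.Set (List Int) → Int → Int
  | 0, _, _, _ => -1
  | fuel + 1, q, visited, step =>
    match q with
    | [] => -1
    | _ :: _ =>
      match pvLevelA target sz q visited [] with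
      | none => step
      | some (visited', q') => pvBfsA target sz fuel q' visited' (step + 1)

def minSplitMerge (nums1 : List Int) (nums2 : List Int) : Int :=
  let sz : Int := (nums1.length : Int)
  pvBfsA nums2 sz (nums1.length ^ nums1.length + 2) [nums1]
    (PySem.Set.add PySem.Set.empty nums1) 0

-- ===== PORT B =====
-- B's getNeighbors (identical move generator, so reachability and step counts agree)
def pvGetNeighborsB (sz : Int) (arr : List Int) : List (List Int) :=
  (PySem.List.pyRange 0 sz 1).foldl (fun res l =>
    (PySem.List.pyRange (l + 1) sz 1).foldl (fun res r =>
      let subarray := PySem.List.slice arr (some l) (some r)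
      let remain := PySem.List.slice arr none (some l) ++ PySem.List.slice arr (some r) none
      (PySem.List.pyRange 0 ((remain.length : Int) + 1) 1).foldl (fun res i =>
        res ++ [PySem.List.slice remain none (some i) ++ subarray ++ PySem.List.slice remain (some i) none]) res) res) []

-- inner 'for nb in getNeighbors(cur)' of one expanding side: none = met the other ball ('return d1 + d2')
def pvExpandNbsB (other : PySem.Set (List Int)) :
    List (List Int) → PySem.Set (List Int) → List (List Int) →
    Option (PySem.Set (List Int) × List (List Int))
  | [], seen, acc => some (seen, acc)
  | nb :: nbs, seen, acc =>
    if seen.contains nb then pvExpandNbsB other nbs seen acc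
    else if other.contains nb then none
    else pvExpandNbsB other nbs (PySem.Set.add seen nb) (acc ++ [nb])

-- 'for cur in front: …' of one expanding side
def pvExpandBiB (sz : Int) (other : PySem.Set (List Int)) :
    List (List Int) → PySem.Set (List Int) → List (List Int) →
    Option (PySem.Set (List Int) × List (List Int))
  | [], seen, acc => some (seen, acc)
  | cur :: rest, seen, acc =>
    match pvExpandNbsB other (pvGetNeighborsB sz cur) seen acc with
    | none => none
    | some (seen', acc') => pvExpandBiB sz other rest seen' acc'

-- the while loop: expand the smaller frontier by one level; fuel only makes the loop total
def pvBiBfsB (sz : Int) :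
    Nat → List (List Int) → List (List Int) → PySem.Set (List Int) → PySem.Set (List Int) →
    Int → Int → Int
  | 0, _, _, _, _, _, _ => -1
  | fuel + 1, f1, f2, s1, s2, d1, d2 =>
    match f1, f2 with
    | [], _ => -1
    | _ :: _, [] => -1
    | c1 :: r1, c2 :: r2 =>
      if (c1 :: r1).length ≤ (c2 :: r2).length then
        match pvExpandBiB sz s2 (c1 :: r1) s1 [] with
        | none => d1 + 1 + d2
        | some (s1', f1') => pvBiBfsB sz fuel f1' (c2 :: r2) s1' s2 (d1 + 1) d2
      else
        match pvExpandBiB sz s1 (c2 :: r2) s2 [] with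
        | none => d1 + (d2 + 1)
        | some (s2', f2') => pvBiBfsB sz fuel (c1 :: r1) f2' s1 s2' d1 (d2 + 1)

def minSplitMerge_alt (nums1 : List Int) (nums2 : List Int) : Int :=
  if nums1 = nums2 then 0
  else if PySem.List.sorted nums1 (fun x => x) false ≠ PySem.List.sorted nums2 (fun x => x) false then -1
  else
    pvBiBfsB (nums1.length : Int) (nums1.length ^ nums1.length + 1)
      [nums1] [nums2] (PySem.Set.add PySem.Set.empty nums1) (PySem.Set.add PySem.Set.empty nums2) 0 0

-- ===== PRECONDITION & SPEC =====
def Spec_minSplitMerge (nums1 : List Int) (nums2 : List Int) (out : Int) : Prop := out = minSplitMerge_alt nums1 nums2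
instance (nums1 : List Int) (nums2 : List Int) (out : Int) : Decidable (Spec_minSplitMerge nums1 nums2 out) := by unfold Spec_minSplitMerge; infer_instance

-- ===== CLAIM (what is proved, stated in full; the proofs are below) =====
def Claim_equal_minSplitMerge : Prop := ∀ (nums1 : List Int) (nums2 : List Int), Dom_minSplitMerge nums1 nums2 → Spec_minSplitMerge nums1 nums2 (minSplitMerge nums1 nums2)

-- ===== LEMMAS AND PROOFS =====

-- ---- generic membership helper for accumulator folds ----
theorem pv_mem_foldl {β γ : Type} (step : List γ → β → List γ) (P : β → γ → Prop)
    (h : ∀ s b x, x ∈ step s b ↔ x ∈ s ∨ P b x) (l : List β) :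
    ∀ (s : List γ) (x : γ), x ∈ l.foldl step s ↔ x ∈ s ∨ ∃ b ∈ l, P b x := by
  induction l with
  | nil => simp
  | cons b t ih =>
    intro s x
    simp only [List.foldl_cons, ih, h, List.mem_cons]
    constructor
    · rintro ((hs | hp) | ⟨c, hc, hp⟩)
      · exact Or.inl hs
      · exact Or.inr ⟨b, Or.inl rfl, hp⟩
      · exact Or.inr ⟨c, Or.inr hc, hp⟩
    · rintro (hs | ⟨c, (rfl | hc), hp⟩)
      · exact Or.inl (Or.inl hs)
      · exact Or.inl (Or.inr hp)
      · exact Or.inr ⟨c, hc, hp⟩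

-- ---- the neighbour relation, shared characterisation of both neighbour generators ----
def pvRemain (arr : List Int) (l r : Int) : List Int :=
  PySem.List.slice arr none (some l) ++ PySem.List.slice arr (some r) none

def pvCand (arr : List Int) (l r i : Int) : List Int :=
  PySem.List.slice (pvRemain arr l r) none (some i) ++ PySem.List.slice arr (some l) (some r) ++
    PySem.List.slice (pvRemain arr l r) (some i) none

def pvNb (sz : Int) (arr x : List Int) : Prop :=
  ∃ l ∈ PySem.List.pyRange 0 sz 1, ∃ r ∈ PySem.List.pyRange (l + 1) sz 1,
    ∃ i ∈ PySem.List.pyRange 0 (((pvRemain arr l r).length : Int) + 1) 1, x = pvCand arr l r i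

theorem mem_nbA (sz : Int) (arr x : List Int) : x ∈ pvGetNeighborsA sz arr ↔ pvNb sz arr x := by
  unfold pvGetNeighborsA pvNb
  rw [pv_mem_foldl _ (fun l x => ∃ r ∈ PySem.List.pyRange (l + 1) sz 1,
        ∃ i ∈ PySem.List.pyRange 0 (((pvRemain arr l r).length : Int) + 1) 1, x = pvCand arr l r i)]
  · simp
  · intro s l x
    rw [pv_mem_foldl _ (fun r x =>
        ∃ i ∈ PySem.List.pyRange 0 (((pvRemain arr l r).length : Int) + 1) 1, x = pvCand arr l r i)]
    intro s r x
    rw [pv_mem_foldl _ (fun i x => x = pvCand arr l r i)]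
    · simp [pvRemain]
    · intro s i x
      simp [pvCand, pvRemain]

theorem mem_nbB (sz : Int) (arr x : List Int) : x ∈ pvGetNeighborsB sz arr ↔ pvNb sz arr x := by
  unfold pvGetNeighborsB pvNb
  rw [pv_mem_foldl _ (fun l x => ∃ r ∈ PySem.List.pyRange (l + 1) sz 1,
        ∃ i ∈ PySem.List.pyRange 0 (((pvRemain arr l r).length : Int) + 1) 1, x = pvCand arr l r i)]
  · simp
  · intro s l x
    rw [pv_mem_foldl _ (fun r x =>
        ∃ i ∈ PySem.List.pyRange 0 (((pvRemain arr l r).length : Int) + 1) 1, x = pvCand arr l r i)]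
    intro s r x
    rw [pv_mem_foldl _ (fun i x => x = pvCand arr l r i)]
    · simp [pvRemain]
    · intro s i x
      simp [pvCand, pvRemain]

-- every neighbour of arr is a rearrangement of arr
theorem pv_perm_abc (a b c : List Int) : (a ++ b ++ c).Perm (b ++ (a ++ c)) := by
  have h2 := (List.perm_append_comm (l₁ := a) (l₂ := b)).append_right c
  exact h2.trans (List.Perm.of_eq (List.append_assoc b a c))

theorem perm_of_pvNb (sz : Int) (arr x : List Int)
    (h : pvNb sz arr x) : x.Perm arr := by
  obtain ⟨l, hl, r, hr, i, hi, rfl⟩ := h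
  rw [PySem.List.mem_pyRange_one] at hl hr hi
  have h0l : 0 ≤ l := hl.1
  have h0r : 0 ≤ r := by omega
  have h0i : 0 ≤ i := hi.1
  unfold pvCand pvRemain
  rw [PySem.List.slice_to _ h0l, PySem.List.slice_from _ h0r, PySem.List.slice_toNat _ h0l h0r,
      PySem.List.slice_to _ h0i, PySem.List.slice_from _ h0i]
  set R := arr.take l.toNat ++ arr.drop r.toNat with hR
  have h1 : R.take i.toNat ++ R.drop i.toNat = R := List.take_append_drop _ _
  have h2 : arr.take l.toNat ++ arr.drop l.toNat = arr := List.take_append_drop _ _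
  have h3 : (arr.drop l.toNat).take (r.toNat - l.toNat) ++ (arr.drop l.toNat).drop (r.toNat - l.toNat)
      = arr.drop l.toNat := List.take_append_drop _ _
  have h4 : (arr.drop l.toNat).drop (r.toNat - l.toNat) = arr.drop r.toNat := by
    rw [List.drop_drop]; congr 1; omega
  refine (pv_perm_abc _ _ _).trans ?_
  rw [h1, hR]
  rw [← List.append_assoc]
  refine (pv_perm_abc _ _ _).trans ?_
  rw [← h4, h3, h2]

-- ---- append-form characterisation of a single move, and its symmetry ----
def pvNbApp (arr x : List Int) : Prop :=
  ∃ A1 B A2 R1 R2 : List Int,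
    arr = A1 ++ B ++ A2 ∧ x = R1 ++ B ++ R2 ∧ R1 ++ R2 = A1 ++ A2 ∧ B ≠ [] ∧ A2 ≠ []

theorem pvNb_iff_app (sz : Int) (arr x : List Int) (h : (arr.length : Int) = sz) :
    pvNb sz arr x ↔ pvNbApp arr x := by
  constructor
  · rintro ⟨l, hl, r, hr, i, hi, rfl⟩
    rw [PySem.List.mem_pyRange_one] at hl hr hi
    have h0l : 0 ≤ l := hl.1
    have h0r : 0 ≤ r := by omega
    have h0i : 0 ≤ i := hi.1
    refine ⟨arr.take l.toNat, (arr.drop l.toNat).take (r.toNat - l.toNat), arr.drop r.toNat,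
      (pvRemain arr l r).take i.toNat, (pvRemain arr l r).drop i.toNat, ?_, ?_, ?_, ?_, ?_⟩
    · have h4 : (arr.drop l.toNat).drop (r.toNat - l.toNat) = arr.drop r.toNat := by
        rw [List.drop_drop]; congr 1; omega
      rw [List.append_assoc, ← h4, List.take_append_drop, List.take_append_drop]
    · unfold pvCand pvRemain
      rw [PySem.List.slice_to _ h0l, PySem.List.slice_from _ h0r, PySem.List.slice_toNat _ h0l h0r,
          PySem.List.slice_to _ h0i, PySem.List.slice_from _ h0i]
    · rw [List.take_append_drop]
      unfold pvRemain
      rw [PySem.List.slice_to _ h0l, PySem.List.slice_from _ h0r]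
    · have hlen : ((arr.drop l.toNat).take (r.toNat - l.toNat)).length = min (r.toNat - l.toNat) (arr.length - l.toNat) := by
        simp
      intro hnil
      rw [hnil] at hlen
      simp at hlen
      omega
    · intro hnil
      have h5 : arr.length - r.toNat = 0 := by
        simpa using congrArg List.length hnil
      omega
  · rintro ⟨A1, B, A2, R1, R2, rfl, rfl, hR, hB, hA2⟩
    have hB1 : 1 ≤ B.length := by
      cases B with
      | nil => exact absurd rfl hB
      | cons _ _ => simp
    have hA21 : 1 ≤ A2.length := by
      cases A2 with
      | nil => exact absurd rfl hA2
      | cons _ _ => simp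
    have hlen : (A1 ++ B ++ A2).length = A1.length + B.length + A2.length := by rw [List.length_append, List.length_append]
    refine ⟨(A1.length : Int), ?_, ((A1.length + B.length : Nat) : Int), ?_, ((R1.length : Nat) : Int), ?_, ?_⟩
    · rw [PySem.List.mem_pyRange_one]
      constructor
      · positivity
      · rw [← h, hlen]; push_cast; omega
    · rw [PySem.List.mem_pyRange_one]
      constructor
      · push_cast; omega
      · rw [← h, hlen]; push_cast; omega
    · rw [PySem.List.mem_pyRange_one]
      have hrem : pvRemain (A1 ++ B ++ A2) (A1.length : Int) ((A1.length + B.length : Nat) : Int) = A1 ++ A2 := by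
        unfold pvRemain
        rw [PySem.List.slice_to _ (by positivity), PySem.List.slice_from _ (by positivity)]
        simp only [Int.toNat_natCast]
        congr 1
        · rw [List.append_assoc, List.take_left]
        · have : A1.length + B.length = (A1 ++ B).length := by simp
          rw [this, List.drop_left]
      rw [hrem]
      have hR12 : R1.length + R2.length = A1.length + A2.length := by
        have := congrArg List.length hR
        simpa using this
      constructor
      · positivity
      · simp only [List.length_append]; push_cast; omega
    · have hrem : pvRemain (A1 ++ B ++ A2) (A1.length : Int) ((A1.length + B.length : Nat) : Int) = A1 ++ A2 := by
        unfold pvRemain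
        rw [PySem.List.slice_to _ (by positivity), PySem.List.slice_from _ (by positivity)]
        simp only [Int.toNat_natCast]
        congr 1
        · rw [List.append_assoc, List.take_left]
        · have : A1.length + B.length = (A1 ++ B).length := by simp
          rw [this, List.drop_left]
      unfold pvCand
      rw [hrem, ← hR]
      rw [PySem.List.slice_to _ (by positivity), PySem.List.slice_from _ (by positivity),
          PySem.List.slice_toNat _ (by positivity) (by positivity)]
      simp only [Int.toNat_natCast]
      rw [List.take_left, List.drop_left]
      congr 1
      congr 1
      rw [List.append_assoc, List.drop_left]
      have hBL : A1.length + B.length - A1.length = B.length := by omega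
      rw [hBL, List.take_left]

theorem pvNbApp_symm (arr x : List Int) (h : pvNbApp arr x) : pvNbApp x arr := by
  obtain ⟨A1, B, A2, R1, R2, harr, hx, hR, hB, hA2⟩ := h
  cases R2 with
  | cons r2h r2t =>
    exact ⟨R1, B, r2h :: r2t, A1, A2, hx, harr, hR.symm, hB, by simp⟩
  | nil =>
    have hR1 : R1 = A1 ++ A2 := by simpa using hR
    refine ⟨A1, A2, B, A1 ++ B, [], ?_, ?_, ?_, hA2, hB⟩
    · rw [hx, hR1]; simp
    · rw [harr]; simp
    · simp

theorem pvNbApp_length (arr x : List Int) (h : pvNbApp arr x) : x.length = arr.length := by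
  obtain ⟨A1, B, A2, R1, R2, harr, hx, hR, _, _⟩ := h
  have := congrArg List.length hR
  subst harr hx
  simp at this ⊢
  omega

theorem pvNb_length (sz : Int) (arr x : List Int) (h : (arr.length : Int) = sz)
    (hnb : pvNb sz arr x) : (x.length : Int) = sz := by
  have happ := (pvNb_iff_app sz arr x h).mp hnb
  rw [pvNbApp_length arr x happ, h]

theorem pvNb_symm (sz : Int) (arr x : List Int) (h : (arr.length : Int) = sz)
    (hnb : pvNb sz arr x) : pvNb sz x arr := by
  have happ := (pvNb_iff_app sz arr x h).mp hnb
  exact (pvNb_iff_app sz x arr (pvNb_length sz arr x h hnb)).mpr (pvNbApp_symm arr x happ)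

-- ---- balls of states around a centre ----
def pvBall (sz : Int) (s : List Int) : Nat → List Int → Prop
  | 0, x => x = s
  | d + 1, x => pvBall sz s d x ∨ ∃ c, pvBall sz s d c ∧ pvNb sz c x

theorem pvBall_self (sz : Int) (s : List Int) : ∀ d, pvBall sz s d s
  | 0 => rfl
  | d + 1 => Or.inl (pvBall_self sz s d)

theorem pvBall_mono (sz : Int) (s : List Int) {d e : Nat} (h : d ≤ e) {x : List Int}
    (hx : pvBall sz s d x) : pvBall sz s e x := by
  induction e with
  | zero => simpa [Nat.le_zero.mp h] using hx
  | succ n ih =>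
    rcases Nat.lt_or_ge d (n + 1) with hlt | hge
    · exact Or.inl (ih (Nat.lt_succ_iff.mp hlt))
    · have : d = n + 1 := le_antisymm h hge
      subst this; exact hx

theorem pvBall_length (sz : Int) (s : List Int) (hs : (s.length : Int) = sz) :
    ∀ d x, pvBall sz s d x → (x.length : Int) = sz := by
  intro d
  induction d with
  | zero => intro x hx; rw [hx]; exact hs
  | succ n ih =>
    rintro x (hx | ⟨c, hc, hnb⟩)
    · exact ih x hx
    · exact pvNb_length sz c x (ih c hc) hnb

theorem pvBall_head (sz : Int) (s : List Int) :
    ∀ d x, pvBall sz s (d + 1) x ↔ pvBall sz s d x ∨ ∃ c, pvNb sz s c ∧ pvBall sz c d x := by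
  intro d
  induction d with
  | zero =>
    intro x
    constructor
    · rintro (hx | ⟨c, hc, hnb⟩)
      · exact Or.inl hx
      · have hc' : c = s := hc
        subst hc'
        exact Or.inr ⟨x, hnb, rfl⟩
    · rintro (hx | ⟨c, hnb, hc⟩)
      · exact Or.inl hx
      · have hc' : x = c := hc
        subst hc'
        exact Or.inr ⟨s, rfl, hnb⟩
  | succ n ih =>
    intro x
    constructor
    · rintro (hx | ⟨c, hc, hnb⟩)
      · rcases (ih x).mp hx with h | ⟨e, he, hex⟩
        · exact Or.inl (Or.inl h)
        · exact Or.inr ⟨e, he, Or.inl hex⟩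
      · rcases (ih c).mp hc with h | ⟨e, he, hec⟩
        · exact Or.inl (Or.inr ⟨c, h, hnb⟩)
        · exact Or.inr ⟨e, he, Or.inr ⟨c, hec, hnb⟩⟩
    · rintro (hx | ⟨e, he, hex⟩)
      · exact Or.inl hx
      · rcases hex with hex | ⟨c, hec, hnb⟩
        · exact Or.inl ((ih x).mpr (Or.inr ⟨e, he, hex⟩))
        · exact Or.inr ⟨c, (ih c).mpr (Or.inr ⟨e, he, hec⟩), hnb⟩

theorem pvBall_trans (sz : Int) (s : List Int) (m : Nat) :
    ∀ n x v, pvBall sz s m x → pvBall sz x n v → pvBall sz s (m + n) v := by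
  intro n
  induction n with
  | zero => intro x v hx hv; rw [hv]; exact hx
  | succ n ih =>
    rintro x v hx (hv | ⟨c, hc, hnb⟩)
    · exact pvBall_mono sz s (by omega) (ih x v hx hv)
    · exact Or.inr ⟨c, ih x c hx hc, hnb⟩

theorem pvBall_split (sz : Int) (s : List Int) (m : Nat) :
    ∀ n t, pvBall sz s (m + n) t → ∃ x, pvBall sz s m x ∧ pvBall sz x n t := by
  intro n
  induction n with
  | zero => intro t ht; exact ⟨t, ht, rfl⟩
  | succ n ih =>
    rintro t (ht | ⟨c, hc, hnb⟩)
    · obtain ⟨x, hx, hxt⟩ := ih t ht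
      exact ⟨x, hx, pvBall_mono sz x (by omega) hxt⟩
    · obtain ⟨x, hx, hxc⟩ := ih c hc
      exact ⟨x, hx, Or.inr ⟨c, hxc, hnb⟩⟩

theorem pvBall_symm (sz : Int) :
    ∀ (d : Nat) (s : List Int), (s.length : Int) = sz → ∀ x, pvBall sz s d x → pvBall sz x d s := by
  intro d
  induction d with
  | zero => intro s _ x hx; exact hx.symm
  | succ n ih =>
    rintro s hs x (hx | ⟨c, hc, hnb⟩)
    · exact pvBall_mono sz x (by omega) (ih s hs x hx)
    · have hcl : (c.length : Int) = sz := pvBall_length sz s hs n c hc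
      have hnb' : pvNb sz x c := pvNb_symm sz c x hcl hnb
      exact (pvBall_head sz x n s).mpr (Or.inr ⟨c, hnb', ih s hs c hc⟩)

-- ---- frontiers ----
def pvFr (sz : Int) (s : List Int) (a : Nat) (x : List Int) : Prop :=
  pvBall sz s a x ∧ ∀ j < a, ¬ pvBall sz s j x

theorem pvFr_zero (sz : Int) (s x : List Int) : pvFr sz s 0 x ↔ x = s := by
  simp [pvFr, pvBall]

theorem pvBall_succ_iff (sz : Int) (s : List Int) (a : Nat) (x : List Int) :
    pvBall sz s (a + 1) x ↔ pvBall sz s a x ∨ ∃ c, pvFr sz s a c ∧ pvNb sz c x := by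
  constructor
  · rintro (hx | ⟨c, hc, hnb⟩)
    · exact Or.inl hx
    · by_cases hax : pvBall sz s a x
      · exact Or.inl hax
      · refine Or.inr ⟨c, ⟨hc, ?_⟩, hnb⟩
        intro j hj hjc
        have hx1 : pvBall sz s (j + 1) x := Or.inr ⟨c, hjc, hnb⟩
        exact hax (pvBall_mono sz s (show j + 1 ≤ a by omega) hx1)
  · rintro (hx | ⟨c, ⟨hc, _⟩, hnb⟩)
    · exact Or.inl hx
    · exact Or.inr ⟨c, hc, hnb⟩

theorem pvFr_succ_iff (sz : Int) (s : List Int) (a : Nat) (x : List Int) :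
    pvFr sz s (a + 1) x ↔ (∃ c, pvFr sz s a c ∧ pvNb sz c x) ∧ ¬ pvBall sz s a x := by
  constructor
  · rintro ⟨hb, hmin⟩
    have hna : ¬ pvBall sz s a x := hmin a (by omega)
    rcases (pvBall_succ_iff sz s a x).mp hb with h | h
    · exact absurd h hna
    · exact ⟨h, hna⟩
  · rintro ⟨⟨c, hc, hnb⟩, hna⟩
    refine ⟨(pvBall_succ_iff sz s a x).mpr (Or.inr ⟨c, hc, hnb⟩), ?_⟩
    intro j hj hjx
    exact hna (pvBall_mono sz s (by omega) hjx)

theorem pvBall_sat (sz : Int) (s : List Int) (a : Nat)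
    (h : ∀ x, pvBall sz s (a + 1) x → pvBall sz s a x) :
    ∀ k x, pvBall sz s (a + k) x → pvBall sz s a x := by
  intro k
  induction k with
  | zero => intro x hx; exact hx
  | succ n ih =>
    rintro x (hx | ⟨c, hc, hnb⟩)
    · exact ih x hx
    · exact h x (Or.inr ⟨c, ih c hc, hnb⟩)

theorem pvFr_empty_ball (sz : Int) (s : List Int) (a : Nat)
    (h : ∀ x, ¬ pvFr sz s (a + 1) x) :
    ∀ d x, pvBall sz s d x → pvBall sz s a x := by
  have hsat : ∀ x, pvBall sz s (a + 1) x → pvBall sz s a x := by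
    intro x hx
    by_cases hax : pvBall sz s a x
    · exact hax
    · exfalso
      refine h x ⟨hx, ?_⟩
      intro j hj hjx
      exact hax (pvBall_mono sz s (by omega) hjx)
  intro d x hx
  rcases Nat.le_total d a with hd | hd
  · exact pvBall_mono sz s hd hx
  · obtain ⟨k, rfl⟩ := Nat.exists_eq_add_of_le hd
    exact pvBall_sat sz s a hsat k x hx

-- ---- characterisation of A's inner neighbour loop ----
theorem pv_expandA_mem (nbs : List (List Int)) :
    ∀ (vis : PySem.Set (List Int)) (acc : List (List Int)),
      (∀ x, x ∈ (pvExpandA vis acc nbs).1 ↔ x ∈ vis ∨ x ∈ nbs) ∧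
      (∀ x, x ∈ (pvExpandA vis acc nbs).2 ↔ x ∈ acc ∨ (x ∈ nbs ∧ x ∉ vis)) := by
  induction nbs with
  | nil => intro vis acc; simp [pvExpandA]
  | cons nb rest ih =>
    intro vis acc
    by_cases hmem : nb ∈ vis
    · have e : pvExpandA vis acc (nb :: rest) = pvExpandA vis acc rest := by
        simp [pvExpandA, hmem]
      rw [e]
      obtain ⟨ih1, ih2⟩ := ih vis acc
      constructor
      · intro x; rw [ih1]; simp only [List.mem_cons]
        constructor
        · rintro (h | h); exact Or.inl h; exact Or.inr (Or.inr h)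
        · rintro (h | rfl | h); exact Or.inl h; exact Or.inl hmem; exact Or.inr h
      · intro x; rw [ih2]; simp only [List.mem_cons]
        constructor
        · rintro (h | h); exact Or.inl h; exact Or.inr ⟨Or.inr h.1, h.2⟩
        · rintro (h | ⟨(rfl | h), hv⟩)
          · exact Or.inl h
          · exact absurd hmem hv
          · exact Or.inr ⟨h, hv⟩
    · have e : pvExpandA vis acc (nb :: rest) = pvExpandA (PySem.Set.add vis nb) (acc ++ [nb]) rest := by
        simp [pvExpandA, hmem]
      rw [e]
      obtain ⟨ih1, ih2⟩ := ih (PySem.Set.add vis nb) (acc ++ [nb])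
      constructor
      · intro x; rw [ih1, PySem.Set.mem_add]; simp only [List.mem_cons]; tauto
      · intro x; rw [ih2, PySem.Set.mem_add]
        simp only [List.mem_append, List.mem_cons, List.not_mem_nil, or_false]
        by_cases hxnb : x = nb
        · subst hxnb; tauto
        · tauto

-- ---- characterisation of one level of A's while loop ----
theorem pv_levelA_none (target : List Int) (sz : Int) (q : List (List Int)) :
    ∀ (vis : PySem.Set (List Int)) (acc : List (List Int)), target ∈ q →
      pvLevelA target sz q vis acc = none := by
  induction q with
  | nil => intro _ _ h; simp at h
  | cons cur rest ih =>
    intro vis acc h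
    by_cases hc : cur = target
    · simp [pvLevelA, hc]
    · have : target ∈ rest := by rcases List.mem_cons.mp h with h | h; exact absurd h.symm hc; exact h
      simp only [pvLevelA, if_neg hc]
      exact ih _ _ this

theorem pv_levelA_some (target : List Int) (sz : Int) (q : List (List Int)) :
    ∀ (vis : PySem.Set (List Int)) (acc : List (List Int)), target ∉ q →
      ∃ vis' q', pvLevelA target sz q vis acc = some (vis', q') ∧
        (∀ x, x ∈ vis' ↔ x ∈ vis ∨ ∃ c ∈ q, x ∈ pvGetNeighborsA sz c) ∧
        (∀ x, x ∈ q' ↔ x ∈ acc ∨ ((∃ c ∈ q, x ∈ pvGetNeighborsA sz c) ∧ x ∉ vis)) := by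
  induction q with
  | nil => intro vis acc _; exact ⟨vis, acc, rfl, by simp, by simp⟩
  | cons cur rest ih =>
    intro vis acc htgt
    have hcur : cur ≠ target := fun h => htgt (by simp [h])
    have htgt' : target ∉ rest := fun h => htgt (List.mem_cons_of_mem _ h)
    obtain ⟨e1, e2⟩ := pv_expandA_mem (pvGetNeighborsA sz cur) vis acc
    obtain ⟨vis', q', heq, hv, hq⟩ := ih (pvExpandA vis acc (pvGetNeighborsA sz cur)).1
      (pvExpandA vis acc (pvGetNeighborsA sz cur)).2 htgt'
    refine ⟨vis', q', ?_, ?_, ?_⟩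
    · simp only [pvLevelA, if_neg hcur]
      exact heq
    · intro x; rw [hv x, e1 x]; simp only [List.mem_cons]
      constructor
      · rintro ((h | h) | ⟨c, hc, h⟩)
        · exact Or.inl h
        · exact Or.inr ⟨cur, Or.inl rfl, h⟩
        · exact Or.inr ⟨c, Or.inr hc, h⟩
      · rintro (h | ⟨c, (rfl | hc), h⟩)
        · exact Or.inl (Or.inl h)
        · exact Or.inl (Or.inr h)
        · exact Or.inr ⟨c, hc, h⟩
    · intro x; rw [hq x, e2 x, e1 x]; simp only [List.mem_cons]
      constructor
      · rintro ((h | ⟨h, hv0⟩) | ⟨⟨c, hc, h⟩, hnv⟩)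
        · exact Or.inl h
        · exact Or.inr ⟨⟨cur, Or.inl rfl, h⟩, hv0⟩
        · exact Or.inr ⟨⟨c, Or.inr hc, h⟩, fun hx => hnv (Or.inl hx)⟩
      · rintro (h | ⟨⟨c, (rfl | hc), h⟩, hnv⟩)
        · exact Or.inl (Or.inl h)
        · exact Or.inl (Or.inr ⟨h, hnv⟩)
        · by_cases hcur' : x ∈ pvGetNeighborsA sz cur
          · exact Or.inl (Or.inr ⟨hcur', hnv⟩)
          · exact Or.inr ⟨⟨c, hc, h⟩, fun hx =>
              (by rcases hx with hx | hx; exact hnv hx; exact hcur' hx)⟩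

-- ---- behaviour of A's while loop ----
theorem pv_bfsA_found (target : List Int) (sz : Int) (fuel : Nat) (q : List (List Int))
    (vis : PySem.Set (List Int)) (step : Int) (h : target ∈ q) :
    pvBfsA target sz (fuel + 1) q vis step = step := by
  cases q with
  | nil => simp at h
  | cons c rest =>
    have hl := pv_levelA_none target sz (c :: rest) vis [] h
    simp [pvBfsA, hl]

theorem pv_bfsA_step (target : List Int) (sz : Int) (fuel : Nat) (c : List Int)
    (rest q' : List (List Int)) (vis vis' : PySem.Set (List Int)) (step : Int)
    (heq : pvLevelA target sz (c :: rest) vis [] = some (vis', q')) :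
    pvBfsA target sz (fuel + 1) (c :: rest) vis step = pvBfsA target sz fuel q' vis' (step + 1) := by
  simp [pvBfsA, heq]

theorem pv_bfsA_unreach (base target : List Int) (htgt : ¬ target.Perm base) :
    ∀ (fuel : Nat) (q : List (List Int)) (vis : PySem.Set (List Int)) (step : Int),
      (∀ c ∈ q, c.Perm base) → pvBfsA target sz fuel q vis step = -1 := by
  intro fuel
  induction fuel with
  | zero => intro q vis step _; rfl
  | succ n ih =>
    intro q vis step hq
    cases q with
    | nil => simp [pvBfsA]
    | cons c rest =>
      have hnt : target ∉ (c :: rest) := fun h => htgt (hq _ h)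
      obtain ⟨vis', q', heq, _, hq'⟩ := pv_levelA_some target sz (c :: rest) vis [] hnt
      have hq'perm : ∀ x ∈ q', x.Perm base := by
        intro x hx
        rcases (hq' x).mp hx with h | ⟨⟨d, hd, hnb⟩, _⟩
        · simp at h
        · exact (perm_of_pvNb sz d x ((mem_nbA sz d x).mp hnb)).trans (hq d hd)
      rw [pv_bfsA_step target sz n c rest q' vis vis' step heq]
      exact ih q' vis' (step + 1) hq'perm

-- one level of A, restated through balls and frontiers around the start s
theorem pv_stepA_inv (t : List Int) (sz : Int) (s : List Int) (a : Nat)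
    (q : List (List Int)) (vis : PySem.Set (List Int))
    (hq : ∀ x, x ∈ q ↔ pvFr sz s a x) (hv : ∀ x, x ∈ vis ↔ pvBall sz s a x)
    (htgt : t ∉ q) :
    ∃ vis' q', pvLevelA t sz q vis [] = some (vis', q') ∧
      (∀ x, x ∈ vis' ↔ pvBall sz s (a + 1) x) ∧
      (∀ x, x ∈ q' ↔ pvFr sz s (a + 1) x) := by
  obtain ⟨vis', q', heq, hv', hq'⟩ := pv_levelA_some t sz q vis [] htgt
  refine ⟨vis', q', heq, ?_, ?_⟩
  · intro x
    rw [hv' x, pvBall_succ_iff]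
    constructor
    · rintro (h | ⟨c, hc, hnb⟩)
      · exact Or.inl ((hv x).mp h)
      · exact Or.inr ⟨c, (hq c).mp hc, (mem_nbA sz c x).mp hnb⟩
    · rintro (h | ⟨c, hc, hnb⟩)
      · exact Or.inl ((hv x).mpr h)
      · exact Or.inr ⟨c, (hq c).mpr hc, (mem_nbA sz c x).mpr hnb⟩
  · intro x
    rw [hq' x, pvFr_succ_iff]
    simp only [List.not_mem_nil, false_or]
    constructor
    · rintro ⟨⟨c, hc, hnb⟩, hnv⟩
      exact ⟨⟨c, (hq c).mp hc, (mem_nbA sz c x).mp hnb⟩, fun h => hnv ((hv x).mpr h)⟩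
    · rintro ⟨⟨c, hc, hnb⟩, hnv⟩
      exact ⟨⟨c, (hq c).mpr hc, (mem_nbA sz c x).mpr hnb⟩, fun h => hnv ((hv x).mp h)⟩

-- A pops the target during the level at which it first enters the ball
theorem pvBfsA_hit (t : List Int) (sz : Int) (s : List Int) :
    ∀ (j F a : Nat) (q : List (List Int)) (vis : PySem.Set (List Int)), j < F →
      (∀ x, x ∈ q ↔ pvFr sz s a x) → (∀ x, x ∈ vis ↔ pvBall sz s a x) →
      pvBall sz s (a + j) t → (∀ i < a + j, ¬ pvBall sz s i t) →
      pvBfsA t sz F q vis (a : Int) = ((a + j : Nat) : Int) := by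
  intro j
  induction j with
  | zero =>
    intro F a q vis hF hq hv hball hmin
    obtain ⟨F', rfl⟩ := Nat.exists_eq_add_of_lt hF
    have htq : t ∈ q := (hq t).mpr ⟨by simpa using hball, fun j hj => hmin j (by omega)⟩
    have hfound := pv_bfsA_found t sz (0 + F') q vis (a : Int) htq
    simpa using hfound
  | succ n ih =>
    intro F a q vis hF hq hv hball hmin
    obtain ⟨F', rfl⟩ := Nat.exists_eq_add_of_lt hF
    have htq : t ∉ q := by
      intro h
      exact hmin a (by omega) ((hq t).mp h).1
    cases q with
    | nil =>
      exfalso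
      have hemp : ∀ x, ¬ pvFr sz s a x := by
        intro x hx
        exact (List.not_mem_nil (a := x)) ((hq x).mpr hx)
      cases a with
      | zero => exact hemp s ((pvFr_zero sz s s).mpr rfl)
      | succ a' =>
        have := pvFr_empty_ball sz s a' hemp (a' + 1 + (n + 1)) t hball
        exact hmin a' (by omega) this
    | cons c rest =>
      obtain ⟨vis', q', heq, hv', hq'⟩ := pv_stepA_inv t sz s a (c :: rest) vis hq hv htq
      rw [pv_bfsA_step t sz (n + 1 + F') c rest q' vis vis' (a : Int) heq]
      have hcast : (a : Int) + 1 = ((a + 1 : Nat) : Int) := by push_cast; ring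
      rw [hcast]
      have := ih (n + 1 + F') (a + 1) q' vis' (by omega) hq' hv'
        (by rw [show a + 1 + n = a + (n + 1) by omega]; exact hball)
        (by intro i hi; exact hmin i (by omega))
      rw [this]
      congr 1
      omega

-- A returns -1 when the target never enters the ball within its fuel
theorem pvBfsA_miss (t : List Int) (sz : Int) (s : List Int) :
    ∀ (F a : Nat) (q : List (List Int)) (vis : PySem.Set (List Int)),
      (∀ x, x ∈ q ↔ pvFr sz s a x) → (∀ x, x ∈ vis ↔ pvBall sz s a x) →
      (∀ i < a + F, ¬ pvBall sz s i t) →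
      pvBfsA t sz F q vis (a : Int) = -1 := by
  intro F
  induction F with
  | zero => intro a q vis _ _ _; rfl
  | succ n ih =>
    intro a q vis hq hv hmin
    cases q with
    | nil => simp [pvBfsA]
    | cons c rest =>
      have htq : t ∉ (c :: rest) := by
        intro h
        exact hmin a (by omega) ((hq t).mp h).1
      obtain ⟨vis', q', heq, hv', hq'⟩ := pv_stepA_inv t sz s a (c :: rest) vis hq hv htq
      rw [pv_bfsA_step t sz n c rest q' vis vis' (a : Int) heq]
      have hcast : (a : Int) + 1 = ((a + 1 : Nat) : Int) := by push_cast; ring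
      rw [hcast]
      exact ih (a + 1) q' vis' hq' hv' (by intro i hi; exact hmin i (by omega))

-- ---- characterisation of B's expansion loops ----
theorem pv_expandNbsB_none (other : PySem.Set (List Int)) :
    ∀ (nbs : List (List Int)) (seen : PySem.Set (List Int)) (acc : List (List Int)),
      pvExpandNbsB other nbs seen acc = none → ∃ nb ∈ nbs, nb ∈ other := by
  intro nbs
  induction nbs with
  | nil => intro seen acc h; simp [pvExpandNbsB] at h
  | cons nb rest ih =>
    intro seen acc h
    by_cases h1 : nb ∈ seen
    · rw [show pvExpandNbsB other (nb :: rest) seen acc = pvExpandNbsB other rest seen acc by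
        simp [pvExpandNbsB, h1]] at h
      obtain ⟨c, hc, ho⟩ := ih seen acc h
      exact ⟨c, List.mem_cons_of_mem _ hc, ho⟩
    · by_cases h2 : nb ∈ other
      · exact ⟨nb, List.mem_cons_self, h2⟩
      · rw [show pvExpandNbsB other (nb :: rest) seen acc =
            pvExpandNbsB other rest (PySem.Set.add seen nb) (acc ++ [nb]) by
          simp [pvExpandNbsB, h1, h2]] at h
        obtain ⟨c, hc, ho⟩ := ih _ _ h
        exact ⟨c, List.mem_cons_of_mem _ hc, ho⟩

theorem pv_expandNbsB_some (other : PySem.Set (List Int)) :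
    ∀ (nbs : List (List Int)) (seen : PySem.Set (List Int)) (acc : List (List Int))
      (seen' : PySem.Set (List Int)) (acc' : List (List Int)),
      pvExpandNbsB other nbs seen acc = some (seen', acc') →
      (∀ x, x ∈ seen' ↔ x ∈ seen ∨ x ∈ nbs) ∧
      (∀ x, x ∈ acc' ↔ x ∈ acc ∨ (x ∈ nbs ∧ x ∉ seen)) ∧
      (∀ nb ∈ nbs, nb ∈ seen ∨ nb ∉ other) := by
  intro nbs
  induction nbs with
  | nil =>
    intro seen acc seen' acc' h
    simp [pvExpandNbsB] at h
    obtain ⟨rfl, rfl⟩ := h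
    exact ⟨by simp, by simp, by simp⟩
  | cons nb rest ih =>
    intro seen acc seen' acc' h
    by_cases h1 : nb ∈ seen
    · rw [show pvExpandNbsB other (nb :: rest) seen acc = pvExpandNbsB other rest seen acc by
        simp [pvExpandNbsB, h1]] at h
      obtain ⟨i1, i2, i3⟩ := ih seen acc seen' acc' h
      refine ⟨?_, ?_, ?_⟩
      · intro x; rw [i1]; simp only [List.mem_cons]
        constructor
        · rintro (h | h); exact Or.inl h; exact Or.inr (Or.inr h)
        · rintro (h | rfl | h); exact Or.inl h; exact Or.inl h1; exact Or.inr h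
      · intro x; rw [i2]; simp only [List.mem_cons]
        constructor
        · rintro (h | h); exact Or.inl h; exact Or.inr ⟨Or.inr h.1, h.2⟩
        · rintro (h | ⟨(rfl | h), hv⟩)
          · exact Or.inl h
          · exact absurd h1 hv
          · exact Or.inr ⟨h, hv⟩
      · intro c hcm
        rcases List.mem_cons.mp hcm with rfl | hc
        · exact Or.inl h1
        · exact i3 c hc
    · by_cases h2 : nb ∈ other
      · exfalso
        rw [show pvExpandNbsB other (nb :: rest) seen acc = none by
          simp [pvExpandNbsB, h1, h2]] at h
        simp at h
      · rw [show pvExpandNbsB other (nb :: rest) seen acc =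
            pvExpandNbsB other rest (PySem.Set.add seen nb) (acc ++ [nb]) by
          simp [pvExpandNbsB, h1, h2]] at h
        obtain ⟨i1, i2, i3⟩ := ih _ _ seen' acc' h
        refine ⟨?_, ?_, ?_⟩
        · intro x; rw [i1, PySem.Set.mem_add]; simp only [List.mem_cons]; tauto
        · intro x; rw [i2, PySem.Set.mem_add]
          simp only [List.mem_append, List.mem_cons, List.not_mem_nil, or_false]
          by_cases hxnb : x = nb
          · subst hxnb; tauto
          · tauto
        · intro c hcm
          rcases List.mem_cons.mp hcm with rfl | hc
          · exact Or.inr h2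
          · rcases i3 c hc with h | h
            · rw [PySem.Set.mem_add] at h
              rcases h with h | rfl
              · exact Or.inl h
              · exact Or.inr h2
            · exact Or.inr h

theorem pvExpandBiB_cons (sz : Int) (other : PySem.Set (List Int)) (cur : List Int)
    (rest : List (List Int)) (seen : PySem.Set (List Int)) (acc : List (List Int)) :
    pvExpandBiB sz other (cur :: rest) seen acc =
      match pvExpandNbsB other (pvGetNeighborsB sz cur) seen acc with
      | none => none
      | some (seen', acc') => pvExpandBiB sz other rest seen' acc' := rfl

theorem pv_expandBiB_none (sz : Int) (other : PySem.Set (List Int)) :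
    ∀ (f : List (List Int)) (seen : PySem.Set (List Int)) (acc : List (List Int)),
      pvExpandBiB sz other f seen acc = none →
      ∃ c ∈ f, ∃ nb, pvNb sz c nb ∧ nb ∈ other := by
  intro f
  induction f with
  | nil => intro seen acc h; simp [pvExpandBiB] at h
  | cons cur rest ih =>
    intro seen acc h
    rw [pvExpandBiB_cons] at h
    cases hinner : pvExpandNbsB other (pvGetNeighborsB sz cur) seen acc with
    | none =>
      obtain ⟨nb, hnb, ho⟩ := pv_expandNbsB_none other _ seen acc hinner
      exact ⟨cur, List.mem_cons_self, nb, (mem_nbB sz cur nb).mp hnb, ho⟩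
    | some p =>
      obtain ⟨ps, pf⟩ := p
      rw [hinner] at h
      have h' : pvExpandBiB sz other rest ps pf = none := h
      obtain ⟨c, hc, nb, hnb, ho⟩ := ih ps pf h'
      exact ⟨c, List.mem_cons_of_mem _ hc, nb, hnb, ho⟩

theorem pv_expandBiB_some (sz : Int) (other : PySem.Set (List Int)) :
    ∀ (f : List (List Int)) (seen : PySem.Set (List Int)) (acc : List (List Int))
      (seen' : PySem.Set (List Int)) (acc' : List (List Int)),
      pvExpandBiB sz other f seen acc = some (seen', acc') →
      (∀ x, x ∈ seen' ↔ x ∈ seen ∨ ∃ c ∈ f, pvNb sz c x) ∧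
      (∀ x, x ∈ acc' ↔ x ∈ acc ∨ ((∃ c ∈ f, pvNb sz c x) ∧ x ∉ seen)) ∧
      (∀ c ∈ f, ∀ x, pvNb sz c x → x ∈ seen ∨ x ∉ other) := by
  intro f
  induction f with
  | nil =>
    intro seen acc seen' acc' h
    simp [pvExpandBiB] at h
    obtain ⟨rfl, rfl⟩ := h
    exact ⟨by simp, by simp, by simp⟩
  | cons cur rest ih =>
    intro seen acc seen' acc' h
    rw [pvExpandBiB_cons] at h
    cases hinner : pvExpandNbsB other (pvGetNeighborsB sz cur) seen acc with
    | none => rw [hinner] at h; simp at h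
    | some p =>
      obtain ⟨ps, pf⟩ := p
      rw [hinner] at h
      have h' : pvExpandBiB sz other rest ps pf = some (seen', acc') := h
      obtain ⟨i1, i2, i3⟩ := pv_expandNbsB_some other _ seen acc ps pf hinner
      obtain ⟨o1, o2, o3⟩ := ih ps pf seen' acc' h'
      have hnbiff : ∀ x, x ∈ pvGetNeighborsB sz cur ↔ pvNb sz cur x := mem_nbB sz cur
      refine ⟨?_, ?_, ?_⟩
      · intro x
        rw [o1 x, i1 x, hnbiff x]
        simp only [List.mem_cons]
        constructor
        · rintro ((h | h) | ⟨c, hc, h⟩)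
          · exact Or.inl h
          · exact Or.inr ⟨cur, Or.inl rfl, h⟩
          · exact Or.inr ⟨c, Or.inr hc, h⟩
        · rintro (h | ⟨c, (rfl | hc), h⟩)
          · exact Or.inl (Or.inl h)
          · exact Or.inl (Or.inr h)
          · exact Or.inr ⟨c, hc, h⟩
      · intro x
        rw [o2 x, i2 x, i1 x, hnbiff x]
        simp only [List.mem_cons]
        constructor
        · rintro ((h | ⟨h, hv0⟩) | ⟨⟨c, hc, h⟩, hnv⟩)
          · exact Or.inl h
          · exact Or.inr ⟨⟨cur, Or.inl rfl, h⟩, hv0⟩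
          · exact Or.inr ⟨⟨c, Or.inr hc, h⟩, fun hx => hnv (Or.inl hx)⟩
        · rintro (h | ⟨⟨c, (rfl | hc), h⟩, hnv⟩)
          · exact Or.inl (Or.inl h)
          · exact Or.inl (Or.inr ⟨h, hnv⟩)
          · by_cases hcur' : pvNb sz cur x
            · exact Or.inl (Or.inr ⟨hcur', hnv⟩)
            · exact Or.inr ⟨⟨c, hc, h⟩, fun hx =>
                (by rcases hx with hx | hx; exact hnv hx; exact hcur' hx)⟩
      · intro c hcm x hnb
        rcases List.mem_cons.mp hcm with rfl | hc
        · exact i3 x ((hnbiff x).mpr hnb)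
        · rcases o3 c hc x hnb with h | h
          · rw [i1 x] at h
            rcases h with h | h
            · exact Or.inl h
            · exact i3 x h
          · exact Or.inr h

-- one expansion of a side, restated through balls and frontiers around that side's centre u
theorem pv_stepB_inv (sz : Int) (u : List Int) (a : Nat)
    (f : List (List Int)) (seen other : PySem.Set (List Int))
    (hf : ∀ x, x ∈ f ↔ pvFr sz u a x) (hs : ∀ x, x ∈ seen ↔ pvBall sz u a x) :
    (pvExpandBiB sz other f seen [] = none →
      ∃ x, pvBall sz u (a + 1) x ∧ x ∈ other) ∧
    (∀ seen' f', pvExpandBiB sz other f seen [] = some (seen', f') →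
      (∀ x, x ∈ seen' ↔ pvBall sz u (a + 1) x) ∧
      (∀ x, x ∈ f' ↔ pvFr sz u (a + 1) x) ∧
      (∀ x, pvFr sz u (a + 1) x → x ∉ other)) := by
  constructor
  · intro h
    obtain ⟨c, hc, nb, hnb, ho⟩ := pv_expandBiB_none sz other f seen [] h
    exact ⟨nb, Or.inr ⟨c, ((hf c).mp hc).1, hnb⟩, ho⟩
  · intro seen' f' h
    obtain ⟨o1, o2, o3⟩ := pv_expandBiB_some sz other f seen [] seen' f' h
    refine ⟨?_, ?_, ?_⟩
    · intro x
      rw [o1 x, pvBall_succ_iff]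
      constructor
      · rintro (h | ⟨c, hc, hnb⟩)
        · exact Or.inl ((hs x).mp h)
        · exact Or.inr ⟨c, (hf c).mp hc, hnb⟩
      · rintro (h | ⟨c, hc, hnb⟩)
        · exact Or.inl ((hs x).mpr h)
        · exact Or.inr ⟨c, (hf c).mpr hc, hnb⟩
    · intro x
      rw [o2 x, pvFr_succ_iff]
      simp only [List.not_mem_nil, false_or]
      constructor
      · rintro ⟨⟨c, hc, hnb⟩, hnv⟩
        exact ⟨⟨c, (hf c).mp hc, hnb⟩, fun h => hnv ((hs x).mpr h)⟩
      · rintro ⟨⟨c, hc, hnb⟩, hnv⟩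
        exact ⟨⟨c, (hf c).mpr hc, hnb⟩, fun h => hnv ((hs x).mp h)⟩
    · intro x hx ho
      obtain ⟨⟨c, hc, hnb⟩, hna⟩ := (pvFr_succ_iff sz u a x).mp hx
      rcases o3 c ((hf c).mpr hc) x hnb with h | h
      · exact hna ((hs x).mp h)
      · exact h ho

-- glue: meeting point of the two balls versus membership of the target in the start's ball
theorem pv_meet_P (sz : Int) (s t : List Int)
    (hs : (s.length : Int) = sz) (ht : (t.length : Int) = sz)
    (m n : Nat) (x : List Int) (h1 : pvBall sz s m x) (h2 : pvBall sz t n x) :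
    pvBall sz s (m + n) t := by
  have hx : (x.length : Int) = sz := pvBall_length sz s hs m x h1
  exact pvBall_trans sz s m n x t h1 (pvBall_symm sz n t ht x h2)

theorem pv_P_meet (sz : Int) (s t : List Int)
    (hs : (s.length : Int) = sz) (m n : Nat)
    (h : pvBall sz s (m + n) t) : ∃ x, pvBall sz s m x ∧ pvBall sz t n x := by
  obtain ⟨x, hx1, hx2⟩ := pvBall_split sz s m n t h
  have hxl : (x.length : Int) = sz := pvBall_length sz s hs m x hx1
  exact ⟨x, hx1, pvBall_symm sz n x hxl t hx2⟩

-- B returns the distance at the expansion whose combined depth first reaches it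
theorem pvBiBfsB_cons (sz : Int) (n : Nat) (c1 : List Int) (r1 : List (List Int))
    (c2 : List Int) (r2 : List (List Int)) (s1 s2 : PySem.Set (List Int)) (d1 d2 : Int) :
    pvBiBfsB sz (n + 1) (c1 :: r1) (c2 :: r2) s1 s2 d1 d2 =
      (if (c1 :: r1).length ≤ (c2 :: r2).length then
        match pvExpandBiB sz s2 (c1 :: r1) s1 [] with
        | none => d1 + 1 + d2
        | some (s1', f1') => pvBiBfsB sz n f1' (c2 :: r2) s1' s2 (d1 + 1) d2
      else
        match pvExpandBiB sz s1 (c2 :: r2) s2 [] with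
        | none => d1 + (d2 + 1)
        | some (s2', f2') => pvBiBfsB sz n (c1 :: r1) f2' s1 s2' d1 (d2 + 1)) := rfl

theorem pvBiBfs_hit (sz : Int) (s t : List Int)
    (hs : (s.length : Int) = sz) (ht : (t.length : Int) = sz) :
    ∀ (fuel : Nat) (a b j : Nat) (f1 f2 : List (List Int)) (s1 s2 : PySem.Set (List Int)),
      1 ≤ j → j ≤ fuel →
      (∀ x, x ∈ f1 ↔ pvFr sz s a x) → (∀ x, x ∈ s1 ↔ pvBall sz s a x) →
      (∀ x, x ∈ f2 ↔ pvFr sz t b x) → (∀ x, x ∈ s2 ↔ pvBall sz t b x) →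
      pvBall sz s (a + b + j) t → (∀ i < a + b + j, ¬ pvBall sz s i t) →
      pvBiBfsB sz fuel f1 f2 s1 s2 (a : Int) (b : Int) = ((a + b + j : Nat) : Int) := by
  intro fuel
  induction fuel with
  | zero =>
    intro a b j f1 f2 s1 s2 hj1 hj0 _ _ _ _ _ _
    exact absurd (hj1.trans hj0) (by omega)
  | succ n ih =>
    intro a b j f1 f2 s1 s2 hj1 hjf h1f h1s h2f h2s hball hmin
    cases f1 with
    | nil =>
      exfalso
      have hemp : ∀ x, ¬ pvFr sz s a x := fun x hx => (List.not_mem_nil (a := x)) ((h1f x).mpr hx)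
      cases a with
      | zero => exact hemp s ((pvFr_zero sz s s).mpr rfl)
      | succ a' =>
        exact hmin a' (by omega) (pvFr_empty_ball sz s a' hemp (a' + 1 + b + j) t hball)
    | cons c1 r1 =>
      cases f2 with
      | nil =>
        exfalso
        have hemp : ∀ x, ¬ pvFr sz t b x := fun x hx => (List.not_mem_nil (a := x)) ((h2f x).mpr hx)
        cases b with
        | zero => exact hemp t ((pvFr_zero sz t t).mpr rfl)
        | succ b' =>
          have hts : pvBall sz t (a + (b' + 1) + j) s :=
            pvBall_symm sz (a + (b' + 1) + j) s hs t hball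
          have := pvFr_empty_ball sz t b' hemp (a + (b' + 1) + j) s hts
          exact hmin b' (by omega) (pvBall_symm sz b' t ht s this)
      | cons c2 r2 =>
        rw [pvBiBfsB_cons]
        obtain ⟨hn1, hsm1⟩ := pv_stepB_inv sz s a (c1 :: r1) s1 s2 h1f h1s
        obtain ⟨hn2, hsm2⟩ := pv_stepB_inv sz t b (c2 :: r2) s2 s1 h2f h2s
        by_cases hlen : (c1 :: r1).length ≤ (c2 :: r2).length
        · rw [if_pos hlen]
          cases hres : pvExpandBiB sz s2 (c1 :: r1) s1 [] with
          | none =>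
            obtain ⟨x, hx1, hx2⟩ := hn1 hres
            have hP : pvBall sz s (a + 1 + b) t :=
              pv_meet_P sz s t hs ht (a + 1) b x hx1 ((h2s x).mp hx2)
            have hj : j = 1 := by
              by_contra hne
              exact hmin (a + 1 + b) (by omega) hP
            subst hj
            show (a : Int) + 1 + (b : Int) = ((a + b + 1 : Nat) : Int)
            push_cast
            ring
          | some p =>
            obtain ⟨ps, pf⟩ := p
            obtain ⟨n1, n2, n3⟩ := hsm1 ps pf hres
            have hnP : ¬ pvBall sz s (a + 1 + b) t := by
              intro hP
              obtain ⟨x, hx1, hx2⟩ := pv_P_meet sz s t hs (a + 1) b hP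
              rcases (pvBall_succ_iff sz s a x).mp hx1 with h | h
              · exact hmin (a + b) (by omega) (pv_meet_P sz s t hs ht a b x h hx2)
              · have hfr : pvFr sz s (a + 1) x := by
                  rw [pvFr_succ_iff]
                  refine ⟨h, ?_⟩
                  intro hax
                  exact hmin (a + b) (by omega) (pv_meet_P sz s t hs ht a b x hax hx2)
                exact n3 x hfr ((h2s x).mpr hx2)
            have hj2 : 2 ≤ j := by
              rcases Nat.lt_or_ge j 2 with h | h
              · have hj : j = 1 := by omega
                subst hj
                exact absurd (by simpa [show a + b + 1 = a + 1 + b by omega] using hball) hnP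
              · exact h
            show pvBiBfsB sz n pf (c2 :: r2) ps s2 ((a : Int) + 1) (b : Int) = ((a + b + j : Nat) : Int)
            have hcast : (a : Int) + 1 = ((a + 1 : Nat) : Int) := by push_cast; ring
            rw [hcast]
            have := ih (a + 1) b (j - 1) pf (c2 :: r2) ps s2 (by omega) (by omega)
              n2 n1 h2f h2s
              (by rw [show a + 1 + b + (j - 1) = a + b + j by omega]; exact hball)
              (by intro i hi; exact hmin i (by omega))
            rw [this]
            congr 1
            omega
        · rw [if_neg hlen]
          cases hres : pvExpandBiB sz s1 (c2 :: r2) s2 [] with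
          | none =>
            obtain ⟨x, hx1, hx2⟩ := hn2 hres
            have hP : pvBall sz s (a + (b + 1)) t :=
              pv_meet_P sz s t hs ht a (b + 1) x ((h1s x).mp hx2) hx1
            have hj : j = 1 := by
              by_contra hne
              exact hmin (a + (b + 1)) (by omega) hP
            subst hj
            show (a : Int) + ((b : Int) + 1) = ((a + b + 1 : Nat) : Int)
            push_cast
            ring
          | some p =>
            obtain ⟨ps, pf⟩ := p
            obtain ⟨n1, n2, n3⟩ := hsm2 ps pf hres
            have hnP : ¬ pvBall sz s (a + (b + 1)) t := by
              intro hP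
              obtain ⟨x, hx1, hx2⟩ := pv_P_meet sz s t hs a (b + 1) hP
              rcases (pvBall_succ_iff sz t b x).mp hx2 with h | h
              · exact hmin (a + b) (by omega) (pv_meet_P sz s t hs ht a b x hx1 h)
              · have hfr : pvFr sz t (b + 1) x := by
                  rw [pvFr_succ_iff]
                  refine ⟨h, ?_⟩
                  intro hbx
                  exact hmin (a + b) (by omega) (pv_meet_P sz s t hs ht a b x hx1 hbx)
                exact n3 x hfr ((h1s x).mpr hx1)
            have hj2 : 2 ≤ j := by
              rcases Nat.lt_or_ge j 2 with h | h
              · have hj : j = 1 := by omega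
                subst hj
                exact absurd (by simpa [show a + b + 1 = a + (b + 1) by omega] using hball) hnP
              · exact h
            show pvBiBfsB sz n (c1 :: r1) pf s1 ps (a : Int) ((b : Int) + 1) = ((a + b + j : Nat) : Int)
            have hcast : (b : Int) + 1 = ((b + 1 : Nat) : Int) := by push_cast; ring
            rw [hcast]
            have := ih a (b + 1) (j - 1) (c1 :: r1) pf s1 ps (by omega) (by omega)
              h1f h1s n2 n1
              (by rw [show a + (b + 1) + (j - 1) = a + b + j by omega]; exact hball)
              (by intro i hi; exact hmin i (by omega))
            rw [this]
            congr 1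
            omega

-- B returns -1 when the target never enters the ball within its fuel
theorem pvBiBfs_miss (sz : Int) (s t : List Int)
    (hs : (s.length : Int) = sz) (ht : (t.length : Int) = sz) :
    ∀ (fuel : Nat) (a b : Nat) (f1 f2 : List (List Int)) (s1 s2 : PySem.Set (List Int)),
      (∀ x, x ∈ f1 ↔ pvFr sz s a x) → (∀ x, x ∈ s1 ↔ pvBall sz s a x) →
      (∀ x, x ∈ f2 ↔ pvFr sz t b x) → (∀ x, x ∈ s2 ↔ pvBall sz t b x) →
      (∀ i ≤ a + b + fuel, ¬ pvBall sz s i t) →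
      pvBiBfsB sz fuel f1 f2 s1 s2 (a : Int) (b : Int) = -1 := by
  intro fuel
  induction fuel with
  | zero => intro a b f1 f2 s1 s2 _ _ _ _ _; rfl
  | succ n ih =>
    intro a b f1 f2 s1 s2 h1f h1s h2f h2s hmin
    cases f1 with
    | nil => rfl
    | cons c1 r1 =>
      cases f2 with
      | nil => rfl
      | cons c2 r2 =>
        rw [pvBiBfsB_cons]
        obtain ⟨hn1, hsm1⟩ := pv_stepB_inv sz s a (c1 :: r1) s1 s2 h1f h1s
        obtain ⟨hn2, hsm2⟩ := pv_stepB_inv sz t b (c2 :: r2) s2 s1 h2f h2s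
        by_cases hlen : (c1 :: r1).length ≤ (c2 :: r2).length
        · rw [if_pos hlen]
          cases hres : pvExpandBiB sz s2 (c1 :: r1) s1 [] with
          | none =>
            exfalso
            obtain ⟨x, hx1, hx2⟩ := hn1 hres
            exact hmin (a + 1 + b) (by omega)
              (pv_meet_P sz s t hs ht (a + 1) b x hx1 ((h2s x).mp hx2))
          | some p =>
            obtain ⟨ps, pf⟩ := p
            obtain ⟨n1, n2, _⟩ := hsm1 ps pf hres
            show pvBiBfsB sz n pf (c2 :: r2) ps s2 ((a : Int) + 1) (b : Int) = -1
            have hcast : (a : Int) + 1 = ((a + 1 : Nat) : Int) := by push_cast; ring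
            rw [hcast]
            exact ih (a + 1) b pf (c2 :: r2) ps s2 n2 n1 h2f h2s
              (by intro i hi; exact hmin i (by omega))
        · rw [if_neg hlen]
          cases hres : pvExpandBiB sz s1 (c2 :: r2) s2 [] with
          | none =>
            exfalso
            obtain ⟨x, hx1, hx2⟩ := hn2 hres
            exact hmin (a + (b + 1)) (by omega)
              (pv_meet_P sz s t hs ht a (b + 1) x ((h1s x).mp hx2) hx1)
          | some p =>
            obtain ⟨ps, pf⟩ := p
            obtain ⟨n1, n2, _⟩ := hsm2 ps pf hres
            show pvBiBfsB sz n (c1 :: r1) pf s1 ps (a : Int) ((b : Int) + 1) = -1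
            have hcast : (b : Int) + 1 = ((b + 1 : Nat) : Int) := by push_cast; ring
            rw [hcast]
            exact ih a (b + 1) (c1 :: r1) pf s1 ps h1f h1s n2 n1
              (by intro i hi; exact hmin i (by omega))

-- a least witness of a satisfiable predicate on ℕ
theorem pv_least {P : Nat → Prop} (h : ∃ n, P n) : ∃ n, P n ∧ ∀ m < n, ¬ P m := by
  classical
  exact ⟨Nat.find h, Nat.find_spec h, fun m hm => Nat.find_min h hm⟩

theorem pv_init_set (nums1 : List Int) : PySem.Set.add PySem.Set.empty nums1 = [nums1] := by
  rw [PySem.Set.add_of_not_mem (by simp [PySem.Set.empty])]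
  rfl

-- ===== VERDICT (by name: the statement is the Claim_ definition above) =====
theorem minSplitMerge_spec : Claim_equal_minSplitMerge := by
  intro nums1 nums2 _
  unfold Spec_minSplitMerge
  simp only [minSplitMerge, minSplitMerge_alt]
  by_cases h1 : nums1 = nums2
  · subst h1
    rw [if_pos rfl]
    exact pv_bfsA_found nums1 (nums1.length : Int) (nums1.length ^ nums1.length + 1) [nums1]
      (PySem.Set.add PySem.Set.empty nums1) 0 (List.mem_cons_self)
  · rw [if_neg h1]
    by_cases h2 : PySem.List.sorted nums1 (fun x => x) false = PySem.List.sorted nums2 (fun x => x) false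
    · rw [if_neg (by simp [h2])]
      have hperm : nums1.Perm nums2 := (PySem.List.sorted_id_eq_sorted_id_iff_perm nums1 nums2).mp h2
      set sz : Int := (nums1.length : Int) with hsz
      have hs : (nums1.length : Int) = sz := rfl
      have ht : (nums2.length : Int) = sz := by rw [← hperm.length_eq]
      have h1f : ∀ x, x ∈ [nums1] ↔ pvFr sz nums1 0 x := by
        intro x; rw [List.mem_singleton, pvFr_zero]
      have h1s : ∀ x, x ∈ (PySem.Set.add PySem.Set.empty nums1 : PySem.Set (List Int)) ↔ pvBall sz nums1 0 x := by
        rw [pv_init_set nums1]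
        intro x; rw [List.mem_singleton]; exact Iff.rfl
      have h2f : ∀ x, x ∈ [nums2] ↔ pvFr sz nums2 0 x := by
        intro x; rw [List.mem_singleton, pvFr_zero]
      have h2s : ∀ x, x ∈ (PySem.Set.add PySem.Set.empty nums2 : PySem.Set (List Int)) ↔ pvBall sz nums2 0 x := by
        rw [pv_init_set nums2]
        intro x; rw [List.mem_singleton]; exact Iff.rfl
      by_cases hex : ∃ d, pvBall sz nums1 d nums2
      · obtain ⟨dmin, hd, hmin⟩ := pv_least hex
        have hd1 : 1 ≤ dmin := by
          rcases Nat.eq_zero_or_pos dmin with h | h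
          · subst h
            have hd0 : nums2 = nums1 := hd
            exact absurd hd0.symm h1
          · exact h
        by_cases hsmall : dmin ≤ nums1.length ^ nums1.length + 1
        · have hA := pvBfsA_hit nums2 sz nums1 dmin (nums1.length ^ nums1.length + 2) 0 [nums1]
            (PySem.Set.add PySem.Set.empty nums1) (by omega) h1f h1s
            (by simpa using hd) (by intro i hi; exact hmin i (by omega))
          have hB := pvBiBfs_hit sz nums1 nums2 hs ht (nums1.length ^ nums1.length + 1) 0 0 dmin
            [nums1] [nums2] (PySem.Set.add PySem.Set.empty nums1) (PySem.Set.add PySem.Set.empty nums2)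
            hd1 hsmall h1f h1s h2f h2s (by simpa using hd) (by intro i hi; exact hmin i (by omega))
          simp only [Nat.cast_zero, Nat.zero_add] at hA hB
          rw [hA, hB]
        · have hA := pvBfsA_miss nums2 sz nums1 (nums1.length ^ nums1.length + 2) 0 [nums1]
            (PySem.Set.add PySem.Set.empty nums1) h1f h1s
            (by intro i hi; exact hmin i (by omega))
          have hB := pvBiBfs_miss sz nums1 nums2 hs ht (nums1.length ^ nums1.length + 1) 0 0
            [nums1] [nums2] (PySem.Set.add PySem.Set.empty nums1) (PySem.Set.add PySem.Set.empty nums2)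
            h1f h1s h2f h2s (by intro i hi; exact hmin i (by omega))
          simp only [Nat.cast_zero] at hA hB
          rw [hA, hB]
      · push_neg at hex
        have hA := pvBfsA_miss nums2 sz nums1 (nums1.length ^ nums1.length + 2) 0 [nums1]
          (PySem.Set.add PySem.Set.empty nums1) h1f h1s (by intro i _; exact hex i)
        have hB := pvBiBfs_miss sz nums1 nums2 hs ht (nums1.length ^ nums1.length + 1) 0 0
          [nums1] [nums2] (PySem.Set.add PySem.Set.empty nums1) (PySem.Set.add PySem.Set.empty nums2)
          h1f h1s h2f h2s (by intro i _; exact hex i)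
        simp only [Nat.cast_zero] at hA hB
        rw [hA, hB]
    · rw [if_pos (by simp [h2])]
      have hnp : ¬ nums2.Perm nums1 := by
        intro hp
        exact h2 ((PySem.List.sorted_id_eq_sorted_id_iff_perm nums1 nums2).mpr hp.symm)
      exact pv_bfsA_unreach nums1 nums2 hnp (nums1.length ^ nums1.length + 2) [nums1]
        (PySem.Set.add PySem.Set.empty nums1) 0
        (by intro c hc; rw [List.mem_singleton] at hc; subst hc; exact List.Perm.refl _)
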